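-- pv_equiv track=rewrite | github.com/jordandox100/onyx-chat-ui | desktop_app/services/safety_filter.py | _check_ngrams
-- ===== SOURCE A (Python) =====
-- DANGER_TERMS = [
--     "ghost gun", "pipe bomb", "molotov", "ricin", "cyanide",
--     "jailbait", "lolicon", "ageplay", "child porn",
--     "bomb", "detonator", "blasting cap", "auto sear",
--     "human trafficking", "assassination", "torture",
-- ]
--
-- def _generate_ngrams(text: str, min_n: int = 2, max_n: int = 6) -> set:
--     """Generate word n-grams from text."""
--     words = text.split()
--     ngrams = set()
--     for n in range(min_n, min(max_n + 1, len(words) + 1)):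
--         for i in range(len(words) - n + 1):
--             ngrams.add(" ".join(words[i:i + n]))
--     return ngrams
--
-- def _check_ngrams(normalized: str) -> bool:
--     """Check n-grams against danger terms."""
--     ngrams = _generate_ngrams(normalized)
--     for term in DANGER_TERMS:
--         if term in ngrams:
--             return True
--         # Also check as substring of the full text
--         if term in normalized:
--             return True
--     return False
-- ===== SOURCE B (Python) =====
-- DANGER_TERMS = [
--     "ghost gun", "pipe bomb", "molotov", "ricin", "cyanide",
--     "jailbait", "lolicon", "ageplay", "child porn",
--     "bomb", "detonator", "blasting cap", "auto sear",
--     "human trafficking", "assassination", "torture",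
-- ]
--
-- def _check_ngrams(normalized: str) -> bool:
--     """Substring scan plus one adjacent-word-pair scan; no n-gram set.
--
--     Every DANGER_TERM has at most two words, so the only n-grams that can
--     ever equal a term are the 2-grams: checking adjacent word pairs against
--     the multi-word terms replaces building the whole 2..6-gram set.
--     """
--     if any(term in normalized for term in DANGER_TERMS):
--         return True
--     words = normalized.split()
--     two_word = [t for t in DANGER_TERMS if " " in t]
--     return any(words[i] + " " + words[i + 1] in two_word
--                for i in range(len(words) - 1))
-- ===== Notes on version B (the rewrite author's own statement) =====
-- stated objective: simpler
-- what changed: Replaces building the full set of 2..6-word n-grams with a direct substring scan over the terms plus a single adjacent-word-pair scan against the multi-word terms (no DANGER_TERM has more than two words, so longer n-grams can never match).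
import Mathlib
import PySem

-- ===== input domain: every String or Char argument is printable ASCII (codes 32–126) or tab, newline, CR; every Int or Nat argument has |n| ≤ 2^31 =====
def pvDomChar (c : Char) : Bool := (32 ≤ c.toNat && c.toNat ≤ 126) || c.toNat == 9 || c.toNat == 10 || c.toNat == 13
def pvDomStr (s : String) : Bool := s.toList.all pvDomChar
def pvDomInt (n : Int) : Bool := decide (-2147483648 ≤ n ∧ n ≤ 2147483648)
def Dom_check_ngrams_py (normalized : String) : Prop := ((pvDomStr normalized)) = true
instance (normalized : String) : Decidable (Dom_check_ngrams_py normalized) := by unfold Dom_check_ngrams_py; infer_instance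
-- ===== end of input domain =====

-- B replaces A's construction of the whole 2..6-word n-gram set by a substring scan plus one
-- adjacent-word-pair scan (no DANGER_TERM has more than two words); objective: simpler.

-- ===== PORT A =====
def dangerTerms : List (List Char) :=
  ["ghost gun".toList, "pipe bomb".toList, "molotov".toList, "ricin".toList, "cyanide".toList,
   "jailbait".toList, "lolicon".toList, "ageplay".toList, "child porn".toList,
   "bomb".toList, "detonator".toList, "blasting cap".toList, "auto sear".toList,
   "human trafficking".toList, "assassination".toList, "torture".toList]

-- port of _generate_ngrams (defaults min_n=2, max_n=6 passed explicitly at the call site)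
def generate_ngrams (text : List Char) (min_n : Int) (max_n : Int) : PySem.Set (List Char) :=
  let words := PySem.Chars.split₀ text
  (PySem.List.pyRange min_n (min (max_n + 1) (PySem.List.len words + 1))).foldl
    (fun ngrams n =>
      (PySem.List.pyRange 0 (PySem.List.len words - n + 1)).foldl
        (fun acc i =>
          PySem.Set.add acc (PySem.Chars.join [' '] (PySem.List.slice words (some i) (some (i + n)))))
        ngrams)
    PySem.Set.empty

-- the 'for term in DANGER_TERMS: … return True … return False' loop of A
def checkTermsA (ngrams : PySem.Set (List Char)) (normalized : List Char) : List (List Char) → Bool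
  | [] => false
  | t :: rest =>
    if PySem.Set.contains ngrams t then true
    else if PySem.Chars.isIn t normalized then true
    else checkTermsA ngrams normalized rest

def check_ngrams_py (normalized : String) : Bool :=
  checkTermsA (generate_ngrams normalized.toList 2 6) normalized.toList dangerTerms

-- ===== PORT B =====
def check_ngrams_py_alt (normalized : String) : Bool :=
  let cs := normalized.toList
  if dangerTerms.any (fun t => PySem.Chars.isIn t cs) then true
  else
    let words := PySem.Chars.split₀ cs
    let twoWord := dangerTerms.filter (fun t => PySem.Chars.isIn [' '] t)
    (PySem.List.pyRange 0 (PySem.List.len words - 1)).any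
      (fun i => twoWord.contains
        (PySem.List.pyGetD words i [] ++ [' '] ++ PySem.List.pyGetD words (i + 1) []))

-- ===== PRECONDITION & SPEC =====
def Spec_check_ngrams_py (normalized : String) (out : Bool) : Prop := out = check_ngrams_py_alt normalized
instance (normalized : String) (out : Bool) : Decidable (Spec_check_ngrams_py normalized out) := by unfold Spec_check_ngrams_py; infer_instance

-- ===== CLAIM (what is proved, stated in full; the proofs are below) =====
def Claim_equal_check_ngrams_py : Prop := ∀ (normalized : String), Dom_check_ngrams_py normalized → Spec_check_ngrams_py normalized (check_ngrams_py normalized)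

-- ===== LEMMAS AND PROOFS =====

-- membership in a doubly nested add-fold (outer loop over n, inner loop over i)
theorem mem_foldl_foldl_add {α β γ : Type} [BEq α] [LawfulBEq α]
    (ns : List β) (g : β → List γ) (f : β → γ → α) (s : PySem.Set α) (y : α) :
    y ∈ ns.foldl (fun acc n => (g n).foldl (fun a i => PySem.Set.add a (f n i)) acc) s ↔
      y ∈ s ∨ ∃ n ∈ ns, ∃ i ∈ g n, y = f n i := by
  induction ns generalizing s with
  | nil => simp
  | cons n ns ih =>
    simp only [List.foldl_cons, ih, PySem.Set.mem_foldl_add, List.mem_cons]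
    aesop

-- a space-joined list of k parts contains at least k-1 spaces
theorem count_space_intercalate (l : List (List Char)) :
    l.length - 1 ≤ List.count ' ' (List.intercalate [' '] l) := by
  induction l with
  | nil => simp
  | cons a l ih =>
    cases l with
    | nil => simp [List.intercalate]
    | cons b l =>
      have h : List.intercalate [' '] (a :: b :: l) = a ++ [' '] ++ List.intercalate [' '] (b :: l) := by
        simp [List.intercalate]
      rw [h]
      simp only [List.count_append, show List.count ' ' ([' '] : List Char) = 1 from rfl]
      simp only [List.length_cons] at ih ⊢
      omega

theorem checkTermsA_eq_any (ngrams : PySem.Set (List Char)) (cs : List Char) (ts : List (List Char)) :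
    checkTermsA ngrams cs ts = ts.any (fun t => PySem.Set.contains ngrams t || PySem.Chars.isIn t cs) := by
  induction ts with
  | nil => rfl
  | cons t ts ih =>
    simp only [checkTermsA, List.any_cons, ih]
    cases PySem.Set.contains ngrams t <;> cases PySem.Chars.isIn t cs <;> simp

-- characterisation of ngram membership for a term with at most one space
-- words[j:j+2] joined with a space is words[j] + " " + words[j+1]
theorem slice_join_pair (ws : List (List Char)) (j : Nat) (h : j + 1 < ws.length) :
    PySem.Chars.join [' '] (PySem.List.slice ws (some (j : Int)) (some ((j : Int) + 2))) =
      ws.getD j [] ++ [' '] ++ ws.getD (j + 1) [] := by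
  have h2 : ((j : Int) + 2) = (j : Int) + ((2 : Nat) : Int) := by norm_num
  rw [h2, PySem.List.slice_natCast_add ws j 2]
  have ht : List.take 2 (List.drop j ws) = [ws.getD j [], ws.getD (j + 1) []] := by
    rw [List.drop_eq_getElem_cons (show j < ws.length by omega),
        List.drop_eq_getElem_cons (show j + 1 < ws.length by omega),
        List.getD_eq_getElem?_getD, List.getD_eq_getElem?_getD,
        List.getElem?_eq_getElem (show j < ws.length by omega),
        List.getElem?_eq_getElem (show j + 1 < ws.length by omega)]
    rfl
  rw [ht]
  show List.intercalate [' '] _ = _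
  simp [List.intercalate]

theorem mem_ngrams_iff_pair (cs t : List Char) (h1 : List.count ' ' t ≤ 1) :
    t ∈ generate_ngrams cs 2 6 ↔
      (List.count ' ' t = 1 ∧ ∃ j : Nat, j + 1 < (PySem.Chars.split₀ cs).length ∧
        t = (PySem.Chars.split₀ cs).getD j [] ++ [' '] ++ (PySem.Chars.split₀ cs).getD (j + 1) []) := by
  unfold generate_ngrams
  rw [mem_foldl_foldl_add]
  set ws := PySem.Chars.split₀ cs with hws
  simp only [PySem.Set.empty, List.not_mem_nil, false_or, PySem.List.mem_pyRange_one,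
    PySem.List.len_eq]
  constructor
  · rintro ⟨n, ⟨hn2, hn7⟩, i, ⟨hi0, hiu⟩, rfl⟩
    have hnL : n < (ws.length : Int) + 1 := lt_of_lt_of_le hn7 (min_le_right _ _)
    obtain ⟨nn, rfl⟩ : ∃ nn : Nat, n = (nn : Int) := ⟨n.toNat, (Int.toNat_of_nonneg (by omega)).symm⟩
    obtain ⟨ii, rfl⟩ : ∃ ii : Nat, i = (ii : Int) := ⟨i.toNat, (Int.toNat_of_nonneg hi0).symm⟩
    have hnn2 : 2 ≤ nn := by exact_mod_cast hn2
    have hbound : ii + nn ≤ ws.length := by omega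
    rw [PySem.List.slice_natCast_add ws ii nn] at h1 ⊢
    have hlen : (List.take nn (List.drop ii ws)).length = nn := by
      simp only [List.length_take, List.length_drop]
      omega
    have hge := count_space_intercalate (List.take nn (List.drop ii ws))
    rw [hlen] at hge
    have hj : PySem.Chars.join [' '] (List.take nn (List.drop ii ws)) =
        List.intercalate [' '] (List.take nn (List.drop ii ws)) := rfl
    rw [hj] at h1 ⊢
    have hnn : nn = 2 := by omega
    subst hnn
    have hslice := slice_join_pair ws ii (by omega)
    rw [show ((ii : Int) + 2) = ((ii : Int) + ((2 : Nat) : Int)) from by norm_num,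
        PySem.List.slice_natCast_add ws ii 2] at hslice
    rw [hj] at hslice
    rw [hslice] at h1 hge ⊢
    refine ⟨by omega, ii, by omega, rfl⟩
  · rintro ⟨hc, j, hj, rfl⟩
    refine ⟨2, ⟨le_refl _, lt_min (by norm_num) (by omega)⟩, (j : Int),
      ⟨by positivity, by omega⟩, ?_⟩
    exact (slice_join_pair ws j hj).symm

-- ===== VERDICT (by name: the statement is the Claim_ definition above) =====
theorem check_ngrams_py_spec : Claim_equal_check_ngrams_py := by
  intro s _
  unfold Spec_check_ngrams_py
  have factA : ∀ t ∈ dangerTerms, List.count ' ' t ≤ 1 := by decide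
  have factB : ∀ t ∈ dangerTerms, (PySem.Chars.isIn [' '] t = true ↔ List.count ' ' t = 1) := by
    decide
  simp only [check_ngrams_py, check_ngrams_py_alt]
  rw [checkTermsA_eq_any]
  set cs := s.toList with hcs
  set N := generate_ngrams cs 2 6 with hN
  apply Bool.eq_iff_iff.mpr
  constructor
  · intro hA
    obtain ⟨t, htDT, ht⟩ := List.any_eq_true.mp hA
    have ht' : t ∈ N ∨ PySem.Chars.isIn t cs = true := by simpa using ht
    rcases ht' with htN | hsub
    · obtain ⟨hc1, j, hj, hteq⟩ := (mem_ngrams_iff_pair cs t (factA t htDT)).mp htN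
      by_cases hany : dangerTerms.any (fun t => PySem.Chars.isIn t cs) = true
      · simp [hany]
      · simp only [Bool.not_eq_true] at hany
        simp only [hany, Bool.false_eq_true, if_false]
        rw [List.any_eq_true]
        refine ⟨(j : Int), ?_, ?_⟩
        · rw [PySem.List.len_eq, PySem.List.mem_pyRange_one]
          constructor
          · positivity
          · omega
        · have h1 : PySem.List.pyGetD (PySem.Chars.split₀ cs) ((j : Int)) [] = (PySem.Chars.split₀ cs).getD j [] :=
            PySem.List.pyGetD_natCast (PySem.Chars.split₀ cs) j []
          have h2 : PySem.List.pyGetD (PySem.Chars.split₀ cs) ((j : Int) + 1) [] = (PySem.Chars.split₀ cs).getD (j + 1) [] := by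
            rw [show ((j : Int) + 1) = (((j + 1 : Nat)) : Int) from by omega,
              PySem.List.pyGetD_natCast]
          rw [h1, h2, ← hteq]
          simp only [List.contains_eq_mem, List.mem_filter, decide_eq_true_eq]
          exact ⟨htDT, (factB t htDT).mpr hc1⟩
    · have hany : dangerTerms.any (fun t => PySem.Chars.isIn t cs) = true :=
        List.any_eq_true.mpr ⟨t, htDT, hsub⟩
      simp [hany]
  · intro hB
    rw [List.any_eq_true]
    by_cases hany : dangerTerms.any (fun t => PySem.Chars.isIn t cs) = true
    · obtain ⟨t, htDT, hsub⟩ := List.any_eq_true.mp hany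
      exact ⟨t, htDT, by simp [hsub]⟩
    · simp only [Bool.not_eq_true] at hany
      simp only [hany, Bool.false_eq_true, if_false] at hB
      obtain ⟨i, hiR, hcont⟩ := List.any_eq_true.mp hB
      rw [PySem.List.len_eq, PySem.List.mem_pyRange_one] at hiR
      obtain ⟨j, rfl⟩ : ∃ j : Nat, i = (j : Int) :=
        ⟨i.toNat, (Int.toNat_of_nonneg hiR.1).symm⟩
      have hj : j + 1 < (PySem.Chars.split₀ cs).length := by
        have := hiR.2
        omega
      have h1 : PySem.List.pyGetD (PySem.Chars.split₀ cs) ((j : Int)) [] = (PySem.Chars.split₀ cs).getD j [] :=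
        PySem.List.pyGetD_natCast (PySem.Chars.split₀ cs) j []
      have h2 : PySem.List.pyGetD (PySem.Chars.split₀ cs) ((j : Int) + 1) [] = (PySem.Chars.split₀ cs).getD (j + 1) [] := by
        rw [show ((j : Int) + 1) = (((j + 1 : Nat)) : Int) from by omega,
          PySem.List.pyGetD_natCast]
      rw [h1, h2] at hcont
      simp only [List.contains_eq_mem, List.mem_filter, decide_eq_true_eq] at hcont
      obtain ⟨htDT, hsp⟩ := hcont
      set t := (PySem.Chars.split₀ cs).getD j [] ++ [' '] ++ (PySem.Chars.split₀ cs).getD (j + 1) [] with hteq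
      have hc1 : List.count ' ' t = 1 := (factB t htDT).mp hsp
      have htN : t ∈ N := (mem_ngrams_iff_pair cs t (by omega)).mpr ⟨hc1, j, hj, rfl⟩
      exact ⟨t, htDT, by rw [Bool.or_eq_true]; exact Or.inl ((PySem.Set.contains_iff N t).mpr htN)⟩
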